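-- pv_equiv track=rewrite | github.com/mtarikozcan/turkish-address-system | src/core/address_matcher.py | _are_neighboring_cities
-- ===== SOURCE A (Python) =====
-- def _are_neighboring_cities(cities1: set, cities2: set) -> bool:
--     """Check if cities are neighbors (simplified logic)"""
--     # Simplified neighboring logic - can be enhanced with actual geographic data
--     neighboring_pairs = {
--         ('istanbul', 'bursa'), ('ankara', 'konya'),
--         ('izmir', 'manisa'), ('antalya', 'mersin')
--     }
--
--     for city1 in cities1:
--         for city2 in cities2:
--             if (city1, city2) in neighboring_pairs or (city2, city1) in neighboring_pairs:
--                 return True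
--
--     return False
-- ===== SOURCE B (Python) =====
-- def _are_neighboring_cities(cities1: set, cities2: set) -> bool:
--     """Check if cities are neighbors (simplified logic)"""
--     # Symmetric adjacency map: each city in the fixed table has exactly one neighbor
--     neighbor_of = {
--         'istanbul': 'bursa', 'bursa': 'istanbul',
--         'ankara': 'konya', 'konya': 'ankara',
--         'izmir': 'manisa', 'manisa': 'izmir',
--         'antalya': 'mersin', 'mersin': 'antalya',
--     }
--     for city in cities1:
--         n = neighbor_of.get(city)
--         if n is not None and n in cities2:
--             return True
--     return False
-- ===== Notes on version B (the rewrite author's own statement) =====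
-- stated objective: faster
-- what changed: Replaces the nested cities1 x cities2 loop with tuple-membership tests by a precomputed symmetric adjacency dictionary mapping each city to its unique neighbor, then a single loop over cities1 doing one dict lookup and one membership test in cities2.
import Mathlib
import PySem

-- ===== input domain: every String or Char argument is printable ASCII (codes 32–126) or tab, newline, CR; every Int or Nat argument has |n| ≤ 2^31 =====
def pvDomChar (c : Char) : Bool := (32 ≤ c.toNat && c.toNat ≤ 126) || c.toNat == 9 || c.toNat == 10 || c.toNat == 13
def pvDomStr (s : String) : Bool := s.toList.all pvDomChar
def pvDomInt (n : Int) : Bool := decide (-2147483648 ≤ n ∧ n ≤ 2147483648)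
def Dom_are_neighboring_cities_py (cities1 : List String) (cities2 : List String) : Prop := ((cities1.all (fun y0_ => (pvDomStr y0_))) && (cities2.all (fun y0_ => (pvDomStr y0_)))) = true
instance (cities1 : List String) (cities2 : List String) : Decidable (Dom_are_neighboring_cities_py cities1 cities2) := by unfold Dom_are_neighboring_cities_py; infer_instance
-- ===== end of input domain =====

-- B replaces the nested cities1 × cities2 scan by a precomputed symmetric neighbor dictionary and a single loop over cities1 (objective: faster — one lookup per city instead of a scan over cities2).


-- ===== PORT A =====
-- A: nested loop over cities1 × cities2, early-return on a hit in the unordered pair table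
def pvPairsA : List (String × String) :=
  [("istanbul", "bursa"), ("ankara", "konya"), ("izmir", "manisa"), ("antalya", "mersin")]

def are_neighboring_cities_py (cities1 : List String) (cities2 : List String) : Bool :=
  cities1.any (fun city1 =>
    cities2.any (fun city2 =>
      pvPairsA.contains (city1, city2) || pvPairsA.contains (city2, city1)))

-- ===== PORT B =====
-- B: symmetric adjacency dict (each known city ↦ its unique neighbor); one loop over cities1,
-- per city one dict lookup and one membership test in cities2
def pvNeighborOf : PySem.Dict String String :=
  PySem.Dict.ofList
    [("istanbul", "bursa"), ("bursa", "istanbul"),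
     ("ankara", "konya"), ("konya", "ankara"),
     ("izmir", "manisa"), ("manisa", "izmir"),
     ("antalya", "mersin"), ("mersin", "antalya")]

def are_neighboring_cities_py_alt (cities1 : List String) (cities2 : List String) : Bool :=
  cities1.any (fun city =>
    match pvNeighborOf.get? city with
    | some n => cities2.contains n
    | none => false)

-- ===== PRECONDITION & SPEC =====
def Spec_are_neighboring_cities_py (cities1 : List String) (cities2 : List String) (out : Bool) : Prop := out = are_neighboring_cities_py_alt cities1 cities2
instance (cities1 : List String) (cities2 : List String) (out : Bool) : Decidable (Spec_are_neighboring_cities_py cities1 cities2 out) := by unfold Spec_are_neighboring_cities_py; infer_instance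

-- ===== CLAIM (what is proved, stated in full; the proofs are below) =====
def Claim_equal_are_neighboring_cities_py : Prop := ∀ (cities1 : List String) (cities2 : List String), Dom_are_neighboring_cities_py cities1 cities2 → Spec_are_neighboring_cities_py cities1 cities2 (are_neighboring_cities_py cities1 cities2)

-- ===== LEMMAS AND PROOFS =====
-- String `==` commuted into a `decide` of the flipped equation.
theorem pv_beq_comm (a b : String) : (a == b) = decide (b = a) := by
  by_cases h : b = a
  · subst h; simp
  · simp [h, Ne.symm h]

-- Pointwise: for fixed city1, A's inner predicate on city2 coincides with "city2 is the
-- dict-neighbor of city1" (each city appears in exactly one pair of the table).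
theorem pv_inner_eq (c1 c2 : String) :
    (pvPairsA.contains (c1, c2) || pvPairsA.contains (c2, c1)) =
      (pvNeighborOf.get? c1 == some c2) := by
  have hd : pvNeighborOf = PySem.Dict.mk
      [("istanbul", "bursa"), ("bursa", "istanbul"),
       ("ankara", "konya"), ("konya", "ankara"),
       ("izmir", "manisa"), ("manisa", "izmir"),
       ("antalya", "mersin"), ("mersin", "antalya")] := by decide
  rw [hd]
  simp only [PySem.Dict.get?_mk_cons, pvPairsA, List.contains_eq_mem, List.mem_cons,
    List.not_mem_nil, or_false, Prod.mk.injEq, beq_iff_eq]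
  clear hd
  split_ifs with i1 i2 i3 i4 i5 i6 i7 i8
  · subst i1; simp [pv_beq_comm]
  · subst i2; simp [pv_beq_comm]
  · subst i3; simp [pv_beq_comm]
  · subst i4; simp [pv_beq_comm]
  · subst i5; simp [pv_beq_comm]
  · subst i6; simp [pv_beq_comm]
  · subst i7; simp [pv_beq_comm]
  · subst i8; simp [pv_beq_comm]
  · simp [PySem.Dict.get?, Ne.symm i1, Ne.symm i2, Ne.symm i3, Ne.symm i4,
      Ne.symm i5, Ne.symm i6, Ne.symm i7, Ne.symm i8]

-- For fixed city1, A's inner scan over cities2 equals B's lookup-then-membership step.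
theorem pv_scan_eq (c1 : String) (cities2 : List String) :
    (cities2.any (fun c2 => pvPairsA.contains (c1, c2) || pvPairsA.contains (c2, c1))) =
      (match pvNeighborOf.get? c1 with
       | some n => cities2.contains n
       | none => false) := by
  simp only [pv_inner_eq]
  cases h : pvNeighborOf.get? c1 with
  | none => simp
  | some n => simp [List.contains_eq_mem, List.any_beq]

-- ===== VERDICT (by name: the statement is the Claim_ definition above) =====
theorem are_neighboring_cities_py_spec : Claim_equal_are_neighboring_cities_py := by
  intro cities1 cities2 _
  unfold Spec_are_neighboring_cities_py are_neighboring_cities_py are_neighboring_cities_py_alt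
  exact congrArg cities1.any (funext fun c1 => pv_scan_eq c1 cities2)
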